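-- pv_equiv track=rewrite | github.com/German-22/Nutri | Nucleos/Despacho.py | validar_entrada
-- ===== SOURCE A (Python) =====
-- def validar_entrada(texto):
--     if texto == "":
--         return True  # permitir borrar todo
--     if texto.startswith('-'):
--         return False
--     if '--' in texto:
--         return False
--     return all(c.isdigit() or c == '-' for c in texto)
-- ===== SOURCE B (Python) =====
-- def validar_entrada(texto):
--     prev = ''
--     for i, c in enumerate(texto):
--         if not (c.isdigit() or c == '-'):
--             return False
--         if c == '-' and (i == 0 or prev == '-'):
--             return False
--         prev = c
--     return True
-- ===== Notes on version B (the rewrite author's own statement) =====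
-- stated objective: alternative
-- what changed: Replaces A's three separate checks (a startswith test, a double-dash substring scan, and an all() scan) with one stateful pass that tracks the previous character and rejects non-digit/dash chars, a leading dash, or two consecutive dashes positionally.
import Mathlib
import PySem

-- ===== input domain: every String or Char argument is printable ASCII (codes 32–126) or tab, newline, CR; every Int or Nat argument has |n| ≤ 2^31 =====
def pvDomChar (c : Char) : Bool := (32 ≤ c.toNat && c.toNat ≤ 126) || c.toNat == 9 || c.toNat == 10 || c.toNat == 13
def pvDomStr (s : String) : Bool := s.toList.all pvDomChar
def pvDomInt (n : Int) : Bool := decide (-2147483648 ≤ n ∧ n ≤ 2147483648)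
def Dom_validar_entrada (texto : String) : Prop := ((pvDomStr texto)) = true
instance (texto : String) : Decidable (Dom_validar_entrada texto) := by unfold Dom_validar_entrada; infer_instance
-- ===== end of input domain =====

-- B replaces A's three separate checks (startswith, '--' substring scan, all() scan)
-- by a single stateful pass tracking the previous character (objective: alternative decomposition).

-- ===== PORT A =====
def validar_entrada (texto : String) : Bool :=
  if texto == "" then true
  else if PySem.Str.startswith texto "-" then false
  else if PySem.Str.isIn "--" texto then false
  else texto.toList.all (fun c => PySem.Chars.isdigit c || c == '-')

-- ===== PORT B =====
-- the loop of Source B: prev = none encodes Python's initial prev = '' / index 0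
def pvAltLoop : List Char → Option Char → Bool
  | [], _ => true
  | c :: rest, prev =>
    if !(PySem.Chars.isdigit c || c == '-') then false
    else if c == '-' && (prev.isNone || prev == some '-') then false
    else pvAltLoop rest (some c)

def validar_entrada_alt (texto : String) : Bool := pvAltLoop texto.toList none

-- ===== PRECONDITION & SPEC =====
def Spec_validar_entrada (texto : String) (out : Bool) : Prop := out = validar_entrada_alt texto
instance (texto : String) (out : Bool) : Decidable (Spec_validar_entrada texto out) := by unfold Spec_validar_entrada; infer_instance

-- ===== CLAIM (what is proved, stated in full; the proofs are below) =====
def Claim_equal_validar_entrada : Prop := ∀ (texto : String), Dom_validar_entrada texto → Spec_validar_entrada texto (validar_entrada texto)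

-- ===== LEMMAS AND PROOFS =====

-- no two consecutive dashes in p :: l
def pvNoConsec : Char → List Char → Bool
  | _, [] => true
  | p, c :: rest => !(p == '-' && c == '-') && pvNoConsec c rest

theorem pvAltLoop_none (l : List Char) : pvAltLoop l none = pvAltLoop l (some '-') := by
  cases l with
  | nil => rfl
  | cons c rest => simp [pvAltLoop]

theorem pvAltLoop_some (l : List Char) (p : Char) :
    pvAltLoop l (some p) = (l.all (fun c => PySem.Chars.isdigit c || c == '-') && pvNoConsec p l) := by
  induction l generalizing p with
  | nil => rfl
  | cons c rest ih =>
    by_cases hd : (PySem.Chars.isdigit c || c == '-') = true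
    · by_cases hc : c = '-'
      · by_cases hp : p = '-'
        · simp [pvAltLoop, pvNoConsec, hc, hp]
        · have hpb : (p == '-') = false := by simp [hp]
          simp [pvAltLoop, pvNoConsec, hc, hpb, ih]
      · have hcb : (c == '-') = false := by simp [hc]
        simp [pvAltLoop, pvNoConsec, hcb, ih, Bool.and_assoc]
    · simp only [Bool.not_eq_true] at hd
      simp [pvAltLoop, pvNoConsec, hd]

theorem pvNoConsec_iff (l : List Char) (p : Char) :
    pvNoConsec p l = true ↔ ¬ (['-', '-'] <:+: (p :: l)) := by
  induction l generalizing p with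
  | nil =>
    simp [pvNoConsec]
    intro h
    have := h.sublist.length_le
    simp at this
  | cons c rest ih =>
    simp [pvNoConsec, ih, List.infix_cons_iff, List.cons_prefix_cons]
    intro _ _
    constructor
    · rintro (h | h) e
      · exact absurd e.symm h
      · intro hcc; exact h hcc.symm
    · intro h
      by_cases hp : p = '-'
      · right; intro hcc; exact (h hp.symm) hcc.symm
      · left; exact hp

-- ===== VERDICT (by name: the statement is the Claim_ definition above) =====
theorem validar_entrada_spec : Claim_equal_validar_entrada := by
  intro texto _
  unfold Spec_validar_entrada validar_entrada validar_entrada_alt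
  rw [pvAltLoop_none, pvAltLoop_some]
  by_cases hnil : texto = ""
  · subst hnil; rfl
  · have hne : (texto == "") = false := by simp [hnil]
    rw [hne]
    have hl : texto.toList ≠ [] := by
      intro h
      apply hnil
      have h2 := congrArg String.ofList h
      simpa using h2
    obtain ⟨c, rest, hcr⟩ := List.exists_cons_of_ne_nil hl
    simp only [Bool.if_false_left]
    by_cases hc : c = '-'
    · have hs : PySem.Str.startswith texto "-" = true := by
        rw [PySem.Str.startswith_eq]
        rw [PySem.Chars.startswith_iff]
        simp [hcr, hc, List.cons_prefix_cons]
      rw [hs]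
      simp [hcr, hc, pvNoConsec]
    · have hs : PySem.Str.startswith texto "-" = false := by
        rw [PySem.Str.startswith_eq]
        simp only [Bool.eq_false_iff, ne_eq]
        intro h
        rw [PySem.Chars.startswith_iff] at h
        rw [hcr] at h
        simp [List.cons_prefix_cons] at h
        exact hc h.symm
      rw [hs]
      have hnc : pvNoConsec '-' texto.toList = pvNoConsec c rest := by
        simp [hcr, pvNoConsec, hc]
      rw [hnc]
      by_cases hin : PySem.Str.isIn "--" texto = true
      · rw [hin]
        have hinf : ['-','-'] <:+: (c :: rest) := by
          have h3 := (PySem.Str.isIn_iff_infix _ _).mp hin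
          simpa [hcr] using h3
        have h2 : pvNoConsec c rest = false := by
          rw [Bool.eq_false_iff]
          intro h; exact (pvNoConsec_iff rest c).mp h hinf
        simp [h2]
      · simp only [Bool.not_eq_true] at hin
        rw [hin]
        have hninf : ¬ ['-','-'] <:+: (c :: rest) := by
          intro h
          have h4 : PySem.Str.isIn "--" texto = true := by
            rw [PySem.Str.isIn_iff_infix]
            simpa [hcr] using h
          rw [hin] at h4
          exact Bool.false_ne_true h4
        have h2 : pvNoConsec c rest = true := (pvNoConsec_iff rest c).mpr hninf
        simp [h2]
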